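-- pv_equiv track=rewrite | github.com/paiml/depyler | examples/hard_final_conc_barrier.py | simulate_phases
-- ===== SOURCE A (Python) =====
-- def create_barrier(num_threads: int) -> list[int]:
--     """Create barrier state: [count_needed, arrived, generation]."""
--     return [num_threads, 0, 0]
--
-- def barrier_arrive(state: list[int], thread_id: int) -> int:
--     """Thread arrives at barrier. Returns generation when released (or -1 if still waiting)."""
--     needed: int = state[0]
--     arrived: int = state[1]
--     arrived = arrived + 1
--     state[1] = arrived
--     if arrived >= needed:
--         gen: int = state[2]
--         state[1] = 0
--         state[2] = gen + 1
--         return gen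
--     return 0 - 1
--
-- def simulate_phases(num_threads: int, num_phases: int) -> list[int]:
--     """Simulate multi-phase computation with barrier sync.
--
--     Returns [total_work_done, phases_completed].
--     """
--     state: list[int] = create_barrier(num_threads)
--     work_done: int = 0
--     phases: int = 0
--     phase: int = 0
--     while phase < num_phases:
--         tid: int = 0
--         while tid < num_threads:
--             work_done = work_done + 1
--             result: int = barrier_arrive(state, tid)
--             if result >= 0:
--                 phases = phases + 1
--             tid = tid + 1
--         phase = phase + 1
--     return [work_done, phases]
-- ===== SOURCE B (Python) =====
-- def simulate_phases(num_threads: int, num_phases: int) -> list[int]: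
--     """Closed form: each phase does one unit of work per thread and the barrier
--     releases exactly once per phase (when the last thread arrives)."""
--     p = max(num_phases, 0)
--     t = max(num_threads, 0)
--     return [t * p, p if num_threads > 0 else 0]
-- ===== Notes on version B (the rewrite author's own statement) =====
-- stated objective: faster
-- what changed: Replaced the nested phase/thread simulation loops with an O(1) closed form: work = threads*phases and phases completed = phases when at least one thread exists, 0 otherwise.
import Mathlib
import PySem

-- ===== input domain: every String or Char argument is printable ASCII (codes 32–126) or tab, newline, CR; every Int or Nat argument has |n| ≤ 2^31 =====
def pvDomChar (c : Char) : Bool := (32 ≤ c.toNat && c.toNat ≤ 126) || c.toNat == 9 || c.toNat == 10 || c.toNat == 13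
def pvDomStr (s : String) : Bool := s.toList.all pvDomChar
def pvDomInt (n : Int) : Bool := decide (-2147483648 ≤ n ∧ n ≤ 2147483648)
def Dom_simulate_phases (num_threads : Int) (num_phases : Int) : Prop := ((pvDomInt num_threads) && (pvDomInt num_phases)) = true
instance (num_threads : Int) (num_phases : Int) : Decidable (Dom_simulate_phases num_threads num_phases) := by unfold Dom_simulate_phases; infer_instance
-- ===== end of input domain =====

-- B replaces the O(phases*threads) nested simulation loops with an O(1) closed form.

-- ===== PORT A =====
def create_barrier (num_threads : Int) : List Int :=
  [num_threads, 0, 0]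

-- state[i] reads use pyGetD (indices 0,1,2 are always in range for the 3-element state);
-- state[i] = v mutation is ported as List.set.
def barrier_arrive (state : List Int) (thread_id : Int) : List Int × Int :=
  let needed := PySem.List.pyGetD state 0 0
  let arrived := PySem.List.pyGetD state 1 0 + 1
  let state1 := state.set 1 arrived
  if arrived ≥ needed then
    let gen := PySem.List.pyGetD state1 2 0
    ((state1.set 1 0).set 2 (gen + 1), gen)
  else
    (state1, 0 - 1)

-- body of the inner 'while tid < num_threads' loop
def pvStep (acc : List Int × Int × Int) (tid : Nat) : List Int × Int × Int :=
  let (st, w, ph) := acc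
  let (st', r) := barrier_arrive st (Int.ofNat tid)
  (st', w + 1, if r ≥ 0 then ph + 1 else ph)

-- the inner 'while tid < num_threads' loop (tid counts 0 .. num_threads-1)
def pvInner (num_threads : Int) (acc : List Int × Int × Int) : List Int × Int × Int :=
  (List.range num_threads.toNat).foldl pvStep acc

def simulate_phases (num_threads : Int) (num_phases : Int) : List Int :=
  let init : List Int × Int × Int := (create_barrier num_threads, 0, 0)
  let res := (List.range num_phases.toNat).foldl (fun acc _ => pvInner num_threads acc) init
  [res.2.1, res.2.2]

-- ===== PORT B =====
def simulate_phases_alt (num_threads : Int) (num_phases : Int) : List Int :=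
  let p := max num_phases 0
  let t := max num_threads 0
  [t * p, if num_threads > 0 then p else 0]

-- ===== PRECONDITION & SPEC =====
def Spec_simulate_phases (num_threads : Int) (num_phases : Int) (out : List Int) : Prop := out = simulate_phases_alt num_threads num_phases
instance (num_threads : Int) (num_phases : Int) (out : List Int) : Decidable (Spec_simulate_phases num_threads num_phases out) := by unfold Spec_simulate_phases; infer_instance

-- ===== CLAIM (what is proved, stated in full; the proofs are below) =====
def Claim_equal_simulate_phases : Prop := ∀ (num_threads : Int) (num_phases : Int), Dom_simulate_phases num_threads num_phases → Spec_simulate_phases num_threads num_phases (simulate_phases num_threads num_phases)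

-- ===== LEMMAS AND PROOFS =====

-- a single arrival that does not fill the barrier
lemma pvStep_no_rel (t a g w ph : Int) (tid : Nat) (h : a + 1 < t) :
    pvStep ([t, a, g], w, ph) tid = ([t, a + 1, g], w + 1, ph) := by
  simp [pvStep, barrier_arrive, PySem.List.pyGetD, PySem.List.pyGet?, PySem.List.pyIdx?,
        List.set]
  rw [if_neg (show ¬ t ≤ a + 1 by omega)]
  simp

-- the last arrival: the barrier releases, generation g ≥ 0 so the phase counts
lemma pvStep_rel (t g w ph : Int) (tid : Nat) (hg : 0 ≤ g) :
    pvStep ([t, t - 1, g], w, ph) tid = ([t, 0, g + 1], w + 1, ph + 1) := by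
  simp [pvStep, barrier_arrive, PySem.List.pyGetD, PySem.List.pyGet?, PySem.List.pyIdx?,
        List.set]
  omega

-- n arrivals that never fill the barrier just advance 'arrived' and 'work'
lemma pvInner_no_rel (t : Int) : ∀ (n : Nat) (a g w ph : Int), a + (n : Int) < t →
    (List.range n).foldl pvStep ([t, a, g], w, ph) = ([t, a + n, g], w + n, ph) := by
  intro n
  induction n with
  | zero => intro a g w ph _; simp
  | succ m ih =>
      intro a g w ph h
      rw [List.range_succ, List.foldl_append]
      rw [ih a g w ph (by push_cast at h ⊢; omega)]
      simp only [List.foldl]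
      rw [pvStep_no_rel t (a + m) g (w + m) ph m (by push_cast at h ⊢; omega)]
      push_cast
      ring_nf

-- one full phase with t ≥ 1 threads: work += t, generation += 1, phases += 1
lemma pvInner_full (t g w ph : Int) (ht : 1 ≤ t) (hg : 0 ≤ g) :
    pvInner t ([t, 0, g], w, ph) = ([t, 0, g + 1], w + t, ph + 1) := by
  obtain ⟨m, hm⟩ : ∃ m, t.toNat = m + 1 := ⟨t.toNat - 1, by omega⟩
  have hmi : (m : Int) = t - 1 := by omega
  unfold pvInner
  rw [hm, List.range_succ, List.foldl_append]
  rw [pvInner_no_rel t m 0 g w ph (by omega)]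
  simp only [List.foldl]
  rw [show (0 : Int) + (m : Int) = t - 1 by omega]
  rw [pvStep_rel t g (w + m) ph m hg]
  rw [hmi]
  ring_nf

-- k phases with t ≥ 1 threads
lemma pvOuter_full (t : Int) (ht : 1 ≤ t) : ∀ (k : Nat) (g w ph : Int), 0 ≤ g →
    (List.range k).foldl (fun acc _ => pvInner t acc) ([t, 0, g], w, ph) =
      ([t, 0, g + k], w + t * k, ph + k) := by
  intro k
  induction k with
  | zero => intro g w ph _; simp
  | succ m ih =>
      intro g w ph hg
      rw [List.range_succ, List.foldl_append]
      rw [ih g w ph hg]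
      simp only [List.foldl]
      rw [pvInner_full t (g + m) (w + t * m) (ph + m) ht (by omega)]
      push_cast
      ring_nf

-- with no threads, a phase does nothing
lemma pvOuter_none (t : Int) (ht : t ≤ 0) : ∀ (k : Nat) (acc : List Int × Int × Int),
    (List.range k).foldl (fun acc _ => pvInner t acc) acc = acc := by
  intro k
  induction k with
  | zero => intro acc; simp
  | succ m ih =>
      intro acc
      rw [List.range_succ, List.foldl_append, ih]
      simp only [List.foldl, pvInner]
      rw [show t.toNat = 0 by omega]
      simp

-- ===== VERDICT (by name: the statement is the Claim_ definition above) =====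
theorem simulate_phases_spec : Claim_equal_simulate_phases := by
  intro t p _
  show simulate_phases t p = simulate_phases_alt t p
  simp only [simulate_phases, simulate_phases_alt, create_barrier]
  by_cases ht : 1 ≤ t
  · rw [pvOuter_full t ht p.toNat 0 0 0 le_rfl]
    have h1 : ((p.toNat : Int)) = max p 0 := by omega
    have h2 : max t 0 = t := by omega
    rw [h1, h2, if_pos (show t > 0 by omega)]
    simp
  · rw [pvOuter_none t (by omega) p.toNat]
    have h2 : max t 0 = 0 := by omega
    rw [h2, if_neg (show ¬ t > 0 by omega)]
    simp
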